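-- pv_equiv track=rewrite | github.com/C-Kernel-Engine/C-Kernel-Engine | version/v7/scripts/build_spec_broader_1_probe_contract_v7.py | _layout_case_budget
-- ===== SOURCE A (Python) =====
-- LAYOUT_ORDER = (
--     "poster_stack",
--     "comparison_span_chart",
--     "pipeline_lane",
--     "dashboard_cards",
--     "dual_panel_compare",
--     "timeline_flow",
--     "table_analysis",
-- )
--
-- def _layout_case_budget(limit: int) -> dict[str, int]:
--     budgets = {layout: 1 for layout in LAYOUT_ORDER}
--     remaining = max(0, int(limit) - len(LAYOUT_ORDER))
--     idx = 0
--     while remaining > 0: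
--         budgets[LAYOUT_ORDER[idx % len(LAYOUT_ORDER)]] += 1
--         remaining -= 1
--         idx += 1
--     return budgets
-- ===== SOURCE B (Python) =====
-- LAYOUT_ORDER = (
--     "poster_stack",
--     "comparison_span_chart",
--     "pipeline_lane",
--     "dashboard_cards",
--     "dual_panel_compare",
--     "timeline_flow",
--     "table_analysis",
-- )
--
-- def _layout_case_budget(limit: int) -> dict[str, int]:
--     n = len(LAYOUT_ORDER)
--     remaining = max(0, int(limit) - n)
--     base, extra = divmod(remaining, n)
--     return {layout: 1 + base + (1 if i < extra else 0)
--             for i, layout in enumerate(LAYOUT_ORDER)}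
-- ===== Notes on version B (the rewrite author's own statement) =====
-- stated objective: faster
-- what changed: replaced the linear round-robin while-loop with a closed-form divmod split: every layout gets the base share and the first few layouts get the remainder
import Mathlib
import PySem

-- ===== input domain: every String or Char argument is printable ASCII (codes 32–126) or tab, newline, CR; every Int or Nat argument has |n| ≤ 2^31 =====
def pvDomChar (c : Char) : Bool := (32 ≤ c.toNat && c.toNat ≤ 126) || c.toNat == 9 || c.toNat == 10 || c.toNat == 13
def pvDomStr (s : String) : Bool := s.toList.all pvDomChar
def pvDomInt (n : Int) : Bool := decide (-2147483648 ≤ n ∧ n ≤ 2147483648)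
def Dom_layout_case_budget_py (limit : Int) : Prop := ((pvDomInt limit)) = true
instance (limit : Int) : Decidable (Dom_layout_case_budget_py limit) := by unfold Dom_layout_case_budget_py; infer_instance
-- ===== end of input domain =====

-- B replaces A's O(limit) round-robin while-loop by a closed-form divmod split of the budget (faster, asymptotic).

-- ===== PORT A =====
def pvLAYOUT_ORDER : List String :=
  ["poster_stack", "comparison_span_chart", "pipeline_lane", "dashboard_cards",
   "dual_panel_compare", "timeline_flow", "table_analysis"]

-- the while loop: fuel = remaining (it decreases by exactly 1 per iteration), idx as in A
def pvLoopA : Nat → Int → PySem.Dict String Int → PySem.Dict String Int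
  | 0, _, d => d
  | r + 1, i, d =>
    match PySem.List.pyGet? pvLAYOUT_ORDER (PySem.Int.mod i (pvLAYOUT_ORDER.length : Int)) with
    | some k => pvLoopA r (i + 1) (d.modify k 0 (· + 1))  -- key always present; budgets[k] += 1
    | none => d  -- unreachable: 0 ≤ i % 7 < 7

def layout_case_budget_py (limit : Int) : List (String × Int) :=
  let budgets := pvLAYOUT_ORDER.foldl (fun d l => d.insert l 1) PySem.Dict.empty
  let remaining := max 0 (limit - (pvLAYOUT_ORDER.length : Int))
  (pvLoopA remaining.toNat 0 budgets).items

-- ===== PORT B =====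
def layout_case_budget_py_alt (limit : Int) : List (String × Int) :=
  let n : Int := (pvLAYOUT_ORDER.length : Int)
  let remaining := max 0 (limit - n)
  let base := PySem.Int.floordiv remaining n     -- divmod(remaining, n); n = 7 ≠ 0
  let extra := PySem.Int.mod remaining n
  (PySem.List.enumerate pvLAYOUT_ORDER 0).map
    (fun p => (p.2, 1 + base + (if p.1 < extra then 1 else 0)))

-- ===== PRECONDITION & SPEC =====
def Spec_layout_case_budget_py (limit : Int) (out : List (String × Int)) : Prop := out = layout_case_budget_py_alt limit
instance (limit : Int) (out : List (String × Int)) : Decidable (Spec_layout_case_budget_py limit out) := by unfold Spec_layout_case_budget_py; infer_instance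

-- ===== CLAIM (what is proved, stated in full; the proofs are below) =====
def Claim_equal_layout_case_budget_py : Prop := ∀ (limit : Int), Dom_layout_case_budget_py limit → Spec_layout_case_budget_py limit (layout_case_budget_py limit)

-- ===== LEMMAS AND PROOFS =====

-- number of iterations among the next r (starting at idx = i) that hit slot j
def pvCnt : Nat → Int → Int → Int
  | 0, _, _ => 0
  | r + 1, i, j => (if PySem.Int.mod i 7 = j then 1 else 0) + pvCnt r (i + 1) j

lemma pvCnt_eq (j : Int) (hj0 : 0 ≤ j) (hj : j < 7) :
    ∀ (r : Nat) (i : Int), 0 ≤ i → pvCnt r i j = ((r : Int) + (i - j - 1) % 7) / 7 := by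
  intro r
  induction r with
  | zero => intro i hi; simp only [pvCnt, Nat.cast_zero]; omega
  | succ r ih =>
    intro i hi
    have hm : PySem.Int.mod i 7 = i % 7 := PySem.Int.mod_eq_emod_of_pos (by norm_num)
    have h2 : (i + 1) - j - 1 = i - j := by ring
    simp only [pvCnt, hm, ih (i + 1) (by omega), h2]
    split_ifs with h <;> push_cast <;> omega

lemma pvCnt_zero_eq (j : Int) (hj0 : 0 ≤ j) (hj : j < 7) (r : Nat) :
    pvCnt r 0 j = ((r : Int) + 6 - j) / 7 := by
  rw [pvCnt_eq j hj0 hj r 0 le_rfl]; omega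

lemma pvLoopA_items (r : Nat) : ∀ (i : Int), 0 ≤ i → ∀ (a b c d e f g : Int),
    (pvLoopA r i (PySem.Dict.mk
      [("poster_stack", a), ("comparison_span_chart", b), ("pipeline_lane", c),
       ("dashboard_cards", d), ("dual_panel_compare", e), ("timeline_flow", f),
       ("table_analysis", g)])).items
    = [("poster_stack", a + pvCnt r i 0), ("comparison_span_chart", b + pvCnt r i 1),
       ("pipeline_lane", c + pvCnt r i 2), ("dashboard_cards", d + pvCnt r i 3),
       ("dual_panel_compare", e + pvCnt r i 4), ("timeline_flow", f + pvCnt r i 5),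
       ("table_analysis", g + pvCnt r i 6)] := by
  induction r with
  | zero => intro i hi a b c d e f g; simp [pvLoopA, pvCnt]
  | succ r ih =>
    intro i hi a b c d e f g
    have hm : PySem.Int.mod i (pvLAYOUT_ORDER.length : Int) = i % 7 :=
      PySem.Int.mod_eq_emod_of_pos (by norm_num [pvLAYOUT_ORDER])
    have h7 : ∀ j : Int, pvCnt (r + 1) i j = (if i % 7 = j then 1 else 0) + pvCnt r (i + 1) j := by
      intro j
      simp only [pvCnt, PySem.Int.mod_eq_emod_of_pos (show (0:Int) < 7 by norm_num)]
    have hr : i % 7 = 0 ∨ i % 7 = 1 ∨ i % 7 = 2 ∨ i % 7 = 3 ∨ i % 7 = 4 ∨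
        i % 7 = 5 ∨ i % 7 = 6 := by omega
    rcases hr with h | h | h | h | h | h | h <;>
      · simp only [pvLoopA, hm, h]
        norm_num [pvLAYOUT_ORDER, PySem.List.pyGet?, PySem.List.pyIdx?, PySem.Dict.modify,
          PySem.Dict.insert, PySem.Dict.getD, PySem.Dict.get?]
        try simp only [Int.reduceToNat, List.getElem_cons_zero, List.getElem_cons_succ,
          String.reduceEq, reduceIte]
        try norm_num [List.find?]
        rw [ih (i + 1) (by omega)]
        simp [h7, h]
        try omega

-- ===== VERDICT (by name: the statement is the Claim_ definition above) =====
theorem layout_case_budget_py_spec : Claim_equal_layout_case_budget_py := by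
  intro limit _
  unfold Spec_layout_case_budget_py layout_case_budget_py layout_case_budget_py_alt
  have hb : pvLAYOUT_ORDER.foldl (fun d l => d.insert l 1) PySem.Dict.empty
      = PySem.Dict.mk
        [("poster_stack", (1:Int)), ("comparison_span_chart", 1), ("pipeline_lane", 1),
         ("dashboard_cards", 1), ("dual_panel_compare", 1), ("timeline_flow", 1),
         ("table_analysis", 1)] := by decide
  simp only [hb]
  set R : Int := max 0 (limit - (pvLAYOUT_ORDER.length : Int)) with hR
  have hR0 : 0 ≤ R := by simp [hR]
  have hRc : (R.toNat : Int) = R := by omega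
  rw [pvLoopA_items R.toNat 0 le_rfl]
  simp only [pvLAYOUT_ORDER, PySem.List.enumerate, List.map,
    pvCnt_zero_eq 0 (by norm_num) (by norm_num), pvCnt_zero_eq 1 (by norm_num) (by norm_num),
    pvCnt_zero_eq 2 (by norm_num) (by norm_num), pvCnt_zero_eq 3 (by norm_num) (by norm_num),
    pvCnt_zero_eq 4 (by norm_num) (by norm_num), pvCnt_zero_eq 5 (by norm_num) (by norm_num),
    pvCnt_zero_eq 6 (by norm_num) (by norm_num), hRc, List.cons.injEq, Prod.mk.injEq]
  norm_num
  split_ifs <;> omega
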